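-- pv_equiv track=rewrite | github.com/Veebeeo/PharmaGuard | backend/cpic_api.py | _classify_recommendation
-- ===== SOURCE A (Python) =====
-- def _classify_recommendation(rec_text: str, implication: str, strength: str) -> tuple:
--     """
--     Derive risk_label, severity, and urgency from CPIC recommendation text.
--     Uses NLP-style keyword matching on official CPIC language.
--     """
--     text = (rec_text + " " + implication).lower()
--
--     # TOXIC patterns
--     if any(kw in text for kw in [
--         "avoid", "contraindicated", "do not use", "not recommended",
--         "fatal", "life-threatening", "severe toxicity", "significantly increased risk",
--         "extremely high risk", "potentially fatal", "serious adverse",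
--     ]):
--         if any(kw in text for kw in ["fatal", "life-threatening", "extremely", "contraindicated"]):
--             return ("Toxic", "critical", "emergent")
--         return ("Toxic", "high", "urgent")
--
--     # INEFFECTIVE patterns (prodrug activation failure)
--     if any(kw in text for kw in [
--         "no therapeutic effect", "lack of efficacy", "reduced activation",
--         "no response", "treatment failure", "insufficient response",
--         "significantly reduced", "markedly reduced",
--     ]):
--         if "significantly" in text or "markedly" in text or "no " in text:
--             return ("Ineffective", "high", "urgent")
--         return ("Ineffective", "moderate", "soon")
--
--     # ADJUST DOSAGE patterns
--     if any(kw in text for kw in [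
--         "reduce dose", "lower dose", "decrease dose", "dose reduction",
--         "increase dose", "higher dose", "alternative drug", "alternative agent",
--         "consider an alternative", "select alternative", "use with caution",
--         "increased risk", "moderate risk", "dose adjust", "reduced dose",
--         "start with", "initiate at", "max dose", "maximum dose",
--         "limit dose",
--     ]):
--         if any(kw in text for kw in ["50%", "80%", "significantly"]):
--             return ("Adjust Dosage", "high", "urgent")
--         return ("Adjust Dosage", "moderate", "soon")
--
--     # SAFE — standard therapy
--     if any(kw in text for kw in [
--         "standard", "no change", "normal", "use recommended",
--         "initiate therapy", "no dose adjustment", "label-recommended",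
--         "no actionable", "no significant",
--     ]):
--         return ("Safe", "none", "routine")
--
--     # Default: if there's a recommendation, it's at least "Adjust"
--     if rec_text.strip():
--         return ("Adjust Dosage", "low", "routine")
--
--     return ("Unknown", "unknown", "routine")
-- ===== SOURCE B (Python) =====
-- _TRIGGER_CAT = {
--     "avoid": 0, "contraindicated": 0, "do not use": 0, "not recommended": 0,
--     "fatal": 0, "life-threatening": 0, "severe toxicity": 0,
--     "significantly increased risk": 0, "extremely high risk": 0,
--     "potentially fatal": 0, "serious adverse": 0,
--     "no therapeutic effect": 1, "lack of efficacy": 1, "reduced activation": 1,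
--     "no response": 1, "treatment failure": 1, "insufficient response": 1,
--     "significantly reduced": 1, "markedly reduced": 1,
--     "reduce dose": 2, "lower dose": 2, "decrease dose": 2, "dose reduction": 2,
--     "increase dose": 2, "higher dose": 2, "alternative drug": 2,
--     "alternative agent": 2, "consider an alternative": 2, "select alternative": 2,
--     "use with caution": 2, "increased risk": 2, "moderate risk": 2,
--     "dose adjust": 2, "reduced dose": 2, "start with": 2, "initiate at": 2,
--     "max dose": 2, "maximum dose": 2, "limit dose": 2,
--     "standard": 3, "no change": 3, "normal": 3, "use recommended": 3,
--     "initiate therapy": 3, "no dose adjustment": 3, "label-recommended": 3,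
--     "no actionable": 3, "no significant": 3,
-- }
--
-- _ESCALATORS = {
--     0: ("fatal", "life-threatening", "extremely", "contraindicated"),
--     1: ("significantly", "markedly", "no "),
--     2: ("50%", "80%", "significantly"),
-- }
--
-- _RESULTS = {
--     0: (("Toxic", "high", "urgent"), ("Toxic", "critical", "emergent")),
--     1: (("Ineffective", "moderate", "soon"), ("Ineffective", "high", "urgent")),
--     2: (("Adjust Dosage", "moderate", "soon"), ("Adjust Dosage", "high", "urgent")),
--     3: (("Safe", "none", "routine"), ("Safe", "none", "routine")),
-- }
--
--
-- # hash index: first character -> keywords that can start there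
-- _BY_FIRST = {}
-- for _kw in list(_TRIGGER_CAT) + [kw for kws in _ESCALATORS.values() for kw in kws]:
--     _BY_FIRST.setdefault(_kw[0], []).append(_kw)
--
--
-- def _classify_recommendation(rec_text: str, implication: str, strength: str) -> tuple:
--     text = (rec_text + " " + implication).lower()
--     # single left-to-right sweep over the text: collect every keyword that
--     # starts at some position, as a set of hits
--     hits = set()
--     for i, ch in enumerate(text):
--         for kw in _BY_FIRST.get(ch, ()):
--             if kw not in hits and text.startswith(kw, i):
--                 hits.add(kw)
--     cats = [c for kw, c in _TRIGGER_CAT.items() if kw in hits]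
--     if cats:
--         cat = min(cats)
--         esc = any(kw in hits for kw in _ESCALATORS.get(cat, ()))
--         return _RESULTS[cat][1 if esc else 0]
--     if rec_text.strip():
--         return ("Adjust Dosage", "low", "routine")
--     return ("Unknown", "unknown", "routine")
-- ===== Notes on version B (the rewrite author's own statement) =====
-- stated objective: alternative
-- what changed: Instead of A's four sequential if/elif keyword scans over the whole text, B builds a hash index from first character to keywords, makes one left-to-right sweep over the text collecting every matched keyword into a hit set, then classifies by the minimum matched category index from a keyword->category dict and a result lookup table.
import Mathlib
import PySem

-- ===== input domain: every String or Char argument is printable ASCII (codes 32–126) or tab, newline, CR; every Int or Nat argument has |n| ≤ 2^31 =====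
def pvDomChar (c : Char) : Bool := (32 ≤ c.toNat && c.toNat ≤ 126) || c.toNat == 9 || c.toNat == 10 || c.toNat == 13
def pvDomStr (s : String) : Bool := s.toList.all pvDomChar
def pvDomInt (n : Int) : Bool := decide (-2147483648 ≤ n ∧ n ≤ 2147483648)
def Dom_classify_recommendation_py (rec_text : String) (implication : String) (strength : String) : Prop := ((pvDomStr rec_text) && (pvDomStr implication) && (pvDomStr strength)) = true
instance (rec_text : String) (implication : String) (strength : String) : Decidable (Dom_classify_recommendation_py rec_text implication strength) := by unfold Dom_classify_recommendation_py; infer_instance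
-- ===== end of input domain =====

-- B replaces A's four hard-coded if/elif keyword scans by a first-character hash
-- index and a single left-to-right sweep over the text collecting a hit-set of
-- matched keywords, then classifies by the minimum matched category (alternative
-- algorithm); return value only, no side effects.

-- ===== PORT A =====
-- Literal transliteration of A's if/elif chain; `kw in text` is PySem.Chars.isIn.
def classify_recommendation_py (rec_text : String) (implication : String) (strength : String) : String × String × String :=
  let text := PySem.Chars.lower (rec_text.toList ++ [' '] ++ implication.toList)
  if ["avoid", "contraindicated", "do not use", "not recommended",
      "fatal", "life-threatening", "severe toxicity", "significantly increased risk",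
      "extremely high risk", "potentially fatal", "serious adverse"].any
        (fun kw => PySem.Chars.isIn kw.toList text) then
    if ["fatal", "life-threatening", "extremely", "contraindicated"].any
        (fun kw => PySem.Chars.isIn kw.toList text) then
      ("Toxic", "critical", "emergent")
    else ("Toxic", "high", "urgent")
  else if ["no therapeutic effect", "lack of efficacy", "reduced activation",
      "no response", "treatment failure", "insufficient response",
      "significantly reduced", "markedly reduced"].any
        (fun kw => PySem.Chars.isIn kw.toList text) then
    if PySem.Chars.isIn "significantly".toList text
        || PySem.Chars.isIn "markedly".toList text
        || PySem.Chars.isIn "no ".toList text then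
      ("Ineffective", "high", "urgent")
    else ("Ineffective", "moderate", "soon")
  else if ["reduce dose", "lower dose", "decrease dose", "dose reduction",
      "increase dose", "higher dose", "alternative drug", "alternative agent",
      "consider an alternative", "select alternative", "use with caution",
      "increased risk", "moderate risk", "dose adjust", "reduced dose",
      "start with", "initiate at", "max dose", "maximum dose",
      "limit dose"].any (fun kw => PySem.Chars.isIn kw.toList text) then
    if ["50%", "80%", "significantly"].any (fun kw => PySem.Chars.isIn kw.toList text) then
      ("Adjust Dosage", "high", "urgent")
    else ("Adjust Dosage", "moderate", "soon")
  else if ["standard", "no change", "normal", "use recommended",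
      "initiate therapy", "no dose adjustment", "label-recommended",
      "no actionable", "no significant"].any
        (fun kw => PySem.Chars.isIn kw.toList text) then
    ("Safe", "none", "routine")
  else if PySem.Chars.strip rec_text.toList ≠ [] then
    ("Adjust Dosage", "low", "routine")
  else ("Unknown", "unknown", "routine")

-- ===== PORT B =====
-- B's dict keyword -> category index (association list, insertion order).
def pvTriggerCat : List (String × Int) :=
  [("avoid", 0), ("contraindicated", 0), ("do not use", 0), ("not recommended", 0),
   ("fatal", 0), ("life-threatening", 0), ("severe toxicity", 0),
   ("significantly increased risk", 0), ("extremely high risk", 0),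
   ("potentially fatal", 0), ("serious adverse", 0),
   ("no therapeutic effect", 1), ("lack of efficacy", 1), ("reduced activation", 1),
   ("no response", 1), ("treatment failure", 1), ("insufficient response", 1),
   ("significantly reduced", 1), ("markedly reduced", 1),
   ("reduce dose", 2), ("lower dose", 2), ("decrease dose", 2), ("dose reduction", 2),
   ("increase dose", 2), ("higher dose", 2), ("alternative drug", 2),
   ("alternative agent", 2), ("consider an alternative", 2), ("select alternative", 2),
   ("use with caution", 2), ("increased risk", 2), ("moderate risk", 2),
   ("dose adjust", 2), ("reduced dose", 2), ("start with", 2), ("initiate at", 2),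
   ("max dose", 2), ("maximum dose", 2), ("limit dose", 2),
   ("standard", 3), ("no change", 3), ("normal", 3), ("use recommended", 3),
   ("initiate therapy", 3), ("no dose adjustment", 3), ("label-recommended", 3),
   ("no actionable", 3), ("no significant", 3)]

-- B's dict category -> escalation keywords.
def pvEscalators : List (Int × List String) :=
  [(0, ["fatal", "life-threatening", "extremely", "contraindicated"]),
   (1, ["significantly", "markedly", "no "]),
   (2, ["50%", "80%", "significantly"])]

-- B's dict category -> (default result, escalated result).
def pvResults : List (Int × ((String × String × String) × (String × String × String))) :=
  [(0, (("Toxic", "high", "urgent"), ("Toxic", "critical", "emergent"))),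
   (1, (("Ineffective", "moderate", "soon"), ("Ineffective", "high", "urgent"))),
   (2, (("Adjust Dosage", "moderate", "soon"), ("Adjust Dosage", "high", "urgent"))),
   (3, (("Safe", "none", "routine"), ("Safe", "none", "routine")))]

-- list(_TRIGGER_CAT) + [kw for kws in _ESCALATORS.values() for kw in kws]
def pvProbes : List String :=
  pvTriggerCat.map (·.1) ++ (pvEscalators.map (·.2)).flatMap (fun kws => kws)

-- B's hash index _BY_FIRST: first character -> keywords that can start there,
-- built by the module-level setdefault/append loop.  Python's 1-character string
-- keys kw[0] / ch are modelled as Char; kw[0] is kw.toList.headD (all keywords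
-- are nonempty, so the default is never used).
def pvByFirst : PySem.Dict Char (List String) :=
  pvProbes.foldl
    (fun d kw => d.insert (kw.toList.headD ' ') (d.getD (kw.toList.headD ' ') [] ++ [kw]))
    PySem.Dict.empty

-- B's sweep: for i, ch in enumerate(text): for kw in _BY_FIRST.get(ch, ()):
-- if kw not in hits and text.startswith(kw, i): hits.add(kw).
-- `text.startswith(kw, i)` is ported as a prefix test on text.drop i.toNat —
-- exact, since i ranges over 0 ≤ i < len(text).
def pvHits (text : List Char) : PySem.Set String :=
  (PySem.List.enumerate text).foldl
    (fun hits p =>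
      (PySem.Dict.getD pvByFirst p.2 []).foldl
        (fun hits kw =>
          if PySem.Set.contains hits kw then hits
          else if PySem.Chars.startswith (text.drop p.1.toNat) kw.toList then
            PySem.Set.add hits kw
          else hits)
        hits)
    PySem.Set.empty

def classify_recommendation_py_alt (rec_text : String) (implication : String) (strength : String) : String × String × String :=
  let text := PySem.Chars.lower (rec_text.toList ++ [' '] ++ implication.toList)
  let hits := pvHits text
  let cats := (pvTriggerCat.filter (fun p => PySem.Set.contains hits p.1)).map (·.2)
  match PySem.List.min? cats (fun c => c) with
  | some cat =>
    -- `_RESULTS[cat]`: cat is a category of a matched trigger, so it is always a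
    -- key of _RESULTS; the getD default is unreachable.
    let pair := (PySem.Dict.ofList pvResults).getD cat
      (("", "", ""), ("", "", ""))
    if ((PySem.Dict.ofList pvEscalators).getD cat []).any
        (fun kw => PySem.Set.contains hits kw) then pair.2
    else pair.1
  | none =>
    if PySem.Chars.strip rec_text.toList ≠ [] then ("Adjust Dosage", "low", "routine")
    else ("Unknown", "unknown", "routine")

-- ===== PRECONDITION & SPEC =====
def Spec_classify_recommendation_py (rec_text : String) (implication : String) (strength : String) (out : String × String × String) : Prop := out = classify_recommendation_py_alt rec_text implication strength
instance (rec_text : String) (implication : String) (strength : String) (out : String × String × String) : Decidable (Spec_classify_recommendation_py rec_text implication strength out) := by unfold Spec_classify_recommendation_py; infer_instance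

-- ===== CLAIM (what is proved, stated in full; the proofs are below) =====
def Claim_equal_classify_recommendation_py : Prop := ∀ (rec_text : String) (implication : String) (strength : String), Dom_classify_recommendation_py rec_text implication strength → Spec_classify_recommendation_py rec_text implication strength (classify_recommendation_py rec_text implication strength)

-- ===== LEMMAS AND PROOFS =====

-- Membership after the inner (probe) loop of B's sweep.
lemma pvMem_inner (text : List Char) (i : Int) (ps : List String) (h : PySem.Set String) (kw : String) :
    kw ∈ ps.foldl
        (fun hits k =>
          if PySem.Set.contains hits k then hits
          else if PySem.Chars.startswith (text.drop i.toNat) k.toList then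
            PySem.Set.add hits k
          else hits)
        h
      ↔ kw ∈ h ∨ (kw ∈ ps ∧ PySem.Chars.startswith (text.drop i.toNat) kw.toList = true) := by
  induction ps generalizing h with
  | nil => simp
  | cons k rest ih =>
    simp only [List.foldl_cons]
    by_cases hc : PySem.Set.contains h k
    · simp only [hc, if_pos, ih, List.mem_cons]
      constructor
      · rintro (hm | ⟨hm, hsw⟩)
        · exact Or.inl hm
        · exact Or.inr ⟨Or.inr hm, hsw⟩
      · rintro (hm | ⟨hk | hm, hsw⟩)
        · exact Or.inl hm
        · subst hk
          exact Or.inl (by simpa [PySem.Set.contains, List.contains_iff_mem] using hc)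
        · exact Or.inr ⟨hm, hsw⟩
    · simp only [hc, if_neg, Bool.not_eq_true] at *
      by_cases hsw : PySem.Chars.startswith (text.drop i.toNat) k.toList = true
      · simp only [hsw, if_pos, ih, PySem.Set.mem_add, List.mem_cons]
        constructor
        · rintro ((hm | rfl) | ⟨hm, hs⟩)
          · exact Or.inl hm
          · exact Or.inr ⟨Or.inl rfl, hsw⟩
          · exact Or.inr ⟨Or.inr hm, hs⟩
        · rintro (hm | ⟨hk | hm, hs⟩)
          · exact Or.inl (Or.inl hm)
          · exact Or.inl (Or.inr hk)
          · exact Or.inr ⟨hm, hs⟩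
      · simp only [hsw, ih, List.mem_cons]
        constructor
        · rintro (hm | ⟨hm, hs⟩)
          · exact Or.inl hm
          · exact Or.inr ⟨Or.inr hm, hs⟩
        · rintro (hm | ⟨hk | hm, hs⟩)
          · exact Or.inl hm
          · subst hk; exact absurd hs hsw
          · exact Or.inr ⟨hm, hs⟩

-- Membership after the outer (position) loop.
lemma pvMem_outer (text : List Char) (prs : List (Int × Char)) (h : PySem.Set String) (kw : String) :
    kw ∈ prs.foldl
        (fun hits p =>
          (PySem.Dict.getD pvByFirst p.2 []).foldl
            (fun hits k =>
              if PySem.Set.contains hits k then hits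
              else if PySem.Chars.startswith (text.drop p.1.toNat) k.toList then
                PySem.Set.add hits k
              else hits)
            hits)
        h
      ↔ kw ∈ h ∨ ∃ p ∈ prs, kw ∈ PySem.Dict.getD pvByFirst p.2 [] ∧
          PySem.Chars.startswith (text.drop p.1.toNat) kw.toList = true := by
  induction prs generalizing h with
  | nil => simp
  | cons p rest ih =>
    simp only [List.foldl_cons, ih, pvMem_inner, List.mem_cons]
    constructor
    · rintro ((hm | ⟨hb, hsw⟩) | ⟨q, hq, hb, hsw⟩)
      · exact Or.inl hm
      · exact Or.inr ⟨p, Or.inl rfl, hb, hsw⟩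
      · exact Or.inr ⟨q, Or.inr hq, hb, hsw⟩
    · rintro (hm | ⟨q, (rfl | hq), hb, hsw⟩)
      · exact Or.inl (Or.inl hm)
      · exact Or.inl (Or.inr ⟨hb, hsw⟩)
      · exact Or.inr ⟨q, hq, hb, hsw⟩

-- Every probe keyword sits in the index bucket of its own first character.
set_option maxRecDepth 8192 in
lemma pvBucket_self : ∀ kw ∈ pvProbes,
    kw ∈ PySem.Dict.getD pvByFirst (kw.toList.headD ' ') [] := by decide

-- A probe keyword is in the hit-set exactly when Python's `kw in text` holds.
lemma pvContains_hits (text : List Char) (kw : String) (hp : kw ∈ pvProbes)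
    (hne : kw.toList ≠ []) :
    PySem.Set.contains (pvHits text) kw = PySem.Chars.isIn kw.toList text := by
  have hmem : kw ∈ pvHits text ↔ PySem.Chars.isIn kw.toList text = true := by
    rw [pvHits, pvMem_outer]
    simp only [PySem.Set.empty, List.not_mem_nil, false_or]
    rw [← PySem.Chars.exists_prefix_drop_iff_isIn]
    constructor
    · rintro ⟨p, _, _, hsw⟩
      exact ⟨p.1.toNat, (PySem.Chars.startswith_iff _ _).1 hsw⟩
    · rintro ⟨j, hpre⟩
      have hjlt : j < text.length := by
        by_contra hge
        rw [List.drop_eq_nil_of_le (by omega)] at hpre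
        exact hne (List.prefix_nil.1 hpre)
      have hhead : text[j] = kw.toList.headD ' ' := by
        obtain ⟨t, ht⟩ := hpre
        cases hk : kw.toList with
        | nil => exact absurd hk hne
        | cons c rest =>
          rw [hk, List.drop_eq_getElem_cons hjlt] at ht
          simp only [List.cons_append, List.cons.injEq] at ht
          rw [ht.1.symm]
          rfl
      refine ⟨((j : Int), text[j]), ?_, ?_, ?_⟩
      · rw [PySem.List.mem_enumerate_iff]
        exact ⟨j, hjlt, by simp⟩
      · rw [hhead]
        exact pvBucket_self kw hp
      · rw [PySem.Chars.startswith_iff]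
        simpa using hpre
  cases hin : PySem.Chars.isIn kw.toList text with
  | true => simpa [PySem.Set.contains, List.contains_iff_mem] using hmem.2 hin
  | false =>
    simp only [PySem.Set.contains]
    rw [Bool.eq_false_iff, Ne, List.contains_iff_mem]
    intro hm
    rw [hmem.1 hm] at hin
    exact Bool.true_eq_false.mp hin

-- Proof-side abbreviations: the four trigger groups as A writes them, and B's cats list.
def pvG0 : List String := ["avoid", "contraindicated", "do not use", "not recommended", "fatal", "life-threatening", "severe toxicity", "significantly increased risk", "extremely high risk", "potentially fatal", "serious adverse"]
def pvG1 : List String := ["no therapeutic effect", "lack of efficacy", "reduced activation", "no response", "treatment failure", "insufficient response", "significantly reduced", "markedly reduced"]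
def pvG2 : List String := ["reduce dose", "lower dose", "decrease dose", "dose reduction", "increase dose", "higher dose", "alternative drug", "alternative agent", "consider an alternative", "select alternative", "use with caution", "increased risk", "moderate risk", "dose adjust", "reduced dose", "start with", "initiate at", "max dose", "maximum dose", "limit dose"]
def pvG3 : List String := ["standard", "no change", "normal", "use recommended", "initiate therapy", "no dose adjustment", "label-recommended", "no actionable", "no significant"]

def pvCatsOf (text : List Char) : List Int :=
  (pvTriggerCat.filter (fun p => PySem.Chars.isIn p.1.toList text)).map (·.2)

-- Rewrite B's filter over the hit-set into plain substring tests.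
lemma pvCats_eq (text : List Char) :
    (pvTriggerCat.filter (fun p => PySem.Set.contains (pvHits text) p.1)).map (·.2)
      = pvCatsOf text := by
  rw [pvCatsOf]
  congr 1
  apply List.filter_congr
  intro p hp
  apply pvContains_hits
  · exact List.mem_append_left _ (List.mem_map_of_mem hp)
  · fin_cases hp <;> decide

-- c is a matched category iff some trigger keyword of group c occurs in the text.
lemma pvMem_cats_iff (text : List Char) (c : Int) :
    c ∈ pvCatsOf text ↔
      ((c = 0 ∧ ∃ kw ∈ pvG0, PySem.Chars.isIn kw.toList text = true) ∨
       (c = 1 ∧ ∃ kw ∈ pvG1, PySem.Chars.isIn kw.toList text = true) ∨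
       (c = 2 ∧ ∃ kw ∈ pvG2, PySem.Chars.isIn kw.toList text = true) ∨
       (c = 3 ∧ ∃ kw ∈ pvG3, PySem.Chars.isIn kw.toList text = true)) := by
  have hdecomp : pvTriggerCat
      = pvG0.map (fun kw => (kw, (0 : Int))) ++ pvG1.map (fun kw => (kw, (1 : Int)))
        ++ pvG2.map (fun kw => (kw, (2 : Int))) ++ pvG3.map (fun kw => (kw, (3 : Int))) := by
    rfl
  rw [pvCatsOf, hdecomp]
  simp only [List.mem_map, List.mem_filter, List.mem_append]
  constructor
  · rintro ⟨p, ⟨(((⟨a, ha, rfl⟩ | ⟨a, ha, rfl⟩) | ⟨a, ha, rfl⟩) | ⟨a, ha, rfl⟩), hin⟩, rfl⟩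
    · exact Or.inl ⟨rfl, a, ha, hin⟩
    · exact Or.inr (Or.inl ⟨rfl, a, ha, hin⟩)
    · exact Or.inr (Or.inr (Or.inl ⟨rfl, a, ha, hin⟩))
    · exact Or.inr (Or.inr (Or.inr ⟨rfl, a, ha, hin⟩))
  · rintro (⟨rfl, a, ha, hin⟩ | ⟨rfl, a, ha, hin⟩ | ⟨rfl, a, ha, hin⟩ | ⟨rfl, a, ha, hin⟩)
    · exact ⟨(a, 0), ⟨Or.inl (Or.inl (Or.inl ⟨a, ha, rfl⟩)), hin⟩, rfl⟩
    · exact ⟨(a, 1), ⟨Or.inl (Or.inl (Or.inr ⟨a, ha, rfl⟩)), hin⟩, rfl⟩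
    · exact ⟨(a, 2), ⟨Or.inl (Or.inr ⟨a, ha, rfl⟩), hin⟩, rfl⟩
    · exact ⟨(a, 3), ⟨Or.inr ⟨a, ha, rfl⟩, hin⟩, rfl⟩

-- Python's min(cats) returns the unique minimum value.
lemma pvMin_eq (cats : List Int) (c : Int) (hmem : c ∈ cats) (hlb : ∀ y ∈ cats, c ≤ y) :
    PySem.List.min? cats (fun x => x) = some c := by
  cases h : PySem.List.min? cats (fun x => x) with
  | none =>
    rw [PySem.List.min?_eq_none_iff] at h
    subst h
    exact absurd hmem (List.not_mem_nil)
  | some m =>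
    have h1 : m ≤ c := PySem.List.min?_isMin h c hmem
    have h2 : c ≤ m := hlb m (PySem.List.min?_mem h)
    have : m = c := le_antisymm h1 h2
    rw [this]

-- ===== VERDICT (by name: the statement is the Claim_ definition above) =====
theorem classify_recommendation_py_spec : Claim_equal_classify_recommendation_py := by
  intro rec_text implication strength _
  unfold Spec_classify_recommendation_py
  simp only [classify_recommendation_py, classify_recommendation_py_alt]
  rw [pvCats_eq]
  set text := PySem.Chars.lower (rec_text.toList ++ [' '] ++ implication.toList) with htext
  by_cases h0 : ∃ kw ∈ pvG0, PySem.Chars.isIn kw.toList text = true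
  · have hmem : (0 : Int) ∈ pvCatsOf text := (pvMem_cats_iff text 0).2 (Or.inl ⟨rfl, h0⟩)
    have hlb : ∀ y ∈ pvCatsOf text, (0 : Int) ≤ y := by
      intro y hy
      rcases (pvMem_cats_iff text y).1 hy with ⟨rfl, _⟩ | ⟨rfl, _⟩ | ⟨rfl, _⟩ | ⟨rfl, _⟩ <;> norm_num
    rw [pvMin_eq _ 0 hmem hlb]
    rw [if_pos (by simpa [pvG0, List.any_eq_true] using h0)]
    have hesc : ((PySem.Dict.ofList pvEscalators).getD (0 : Int) [])
        = ["fatal", "life-threatening", "extremely", "contraindicated"] := by rfl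
    have hpair : ((PySem.Dict.ofList pvResults).getD (0 : Int) (("", "", ""), ("", "", "")))
        = (("Toxic", "high", "urgent"), ("Toxic", "critical", "emergent")) := by rfl
    simp only [hesc, hpair]
    simp only [List.any_cons, List.any_nil]
    simp only [pvContains_hits text "fatal" (by decide) (by decide),
        pvContains_hits text "life-threatening" (by decide) (by decide),
        pvContains_hits text "extremely" (by decide) (by decide),
        pvContains_hits text "contraindicated" (by decide) (by decide)]
    rfl
  · by_cases h1 : ∃ kw ∈ pvG1, PySem.Chars.isIn kw.toList text = true
    · have hmem : (1 : Int) ∈ pvCatsOf text :=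
        (pvMem_cats_iff text 1).2 (Or.inr (Or.inl ⟨rfl, h1⟩))
      have hlb : ∀ y ∈ pvCatsOf text, (1 : Int) ≤ y := by
        intro y hy
        rcases (pvMem_cats_iff text y).1 hy with ⟨rfl, h⟩ | ⟨rfl, _⟩ | ⟨rfl, _⟩ | ⟨rfl, _⟩
        · exact absurd h h0
        all_goals norm_num
      rw [pvMin_eq _ 1 hmem hlb]
      rw [if_neg (by simpa [pvG0, List.any_eq_true] using h0),
          if_pos (by simpa [pvG1, List.any_eq_true] using h1)]
      have hesc : ((PySem.Dict.ofList pvEscalators).getD (1 : Int) [])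
          = ["significantly", "markedly", "no "] := by rfl
      have hpair : ((PySem.Dict.ofList pvResults).getD (1 : Int) (("", "", ""), ("", "", "")))
          = (("Ineffective", "moderate", "soon"), ("Ineffective", "high", "urgent")) := by rfl
      simp only [hesc, hpair]
      simp only [List.any_cons, List.any_nil]
      simp only [pvContains_hits text "significantly" (by decide) (by decide),
          pvContains_hits text "markedly" (by decide) (by decide),
          pvContains_hits text "no " (by decide) (by decide), Bool.or_false]
      rw [Bool.or_assoc]
    · by_cases h2 : ∃ kw ∈ pvG2, PySem.Chars.isIn kw.toList text = true
      · have hmem : (2 : Int) ∈ pvCatsOf text :=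
          (pvMem_cats_iff text 2).2 (Or.inr (Or.inr (Or.inl ⟨rfl, h2⟩)))
        have hlb : ∀ y ∈ pvCatsOf text, (2 : Int) ≤ y := by
          intro y hy
          rcases (pvMem_cats_iff text y).1 hy with ⟨rfl, h⟩ | ⟨rfl, h⟩ | ⟨rfl, _⟩ | ⟨rfl, _⟩
          · exact absurd h h0
          · exact absurd h h1
          all_goals norm_num
        rw [pvMin_eq _ 2 hmem hlb]
        rw [if_neg (by simpa [pvG0, List.any_eq_true] using h0),
            if_neg (by simpa [pvG1, List.any_eq_true] using h1),
            if_pos (by simpa [pvG2, List.any_eq_true] using h2)]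
        have hesc : ((PySem.Dict.ofList pvEscalators).getD (2 : Int) [])
            = ["50%", "80%", "significantly"] := by rfl
        have hpair : ((PySem.Dict.ofList pvResults).getD (2 : Int) (("", "", ""), ("", "", "")))
            = (("Adjust Dosage", "moderate", "soon"), ("Adjust Dosage", "high", "urgent")) := by rfl
        simp only [hesc, hpair]
        simp only [List.any_cons, List.any_nil]
        simp only [pvContains_hits text "50%" (by decide) (by decide),
            pvContains_hits text "80%" (by decide) (by decide),
            pvContains_hits text "significantly" (by decide) (by decide)]
        rfl
      · by_cases h3 : ∃ kw ∈ pvG3, PySem.Chars.isIn kw.toList text = true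
        · have hmem : (3 : Int) ∈ pvCatsOf text :=
            (pvMem_cats_iff text 3).2 (Or.inr (Or.inr (Or.inr ⟨rfl, h3⟩)))
          have hlb : ∀ y ∈ pvCatsOf text, (3 : Int) ≤ y := by
            intro y hy
            rcases (pvMem_cats_iff text y).1 hy with ⟨rfl, h⟩ | ⟨rfl, h⟩ | ⟨rfl, h⟩ | ⟨rfl, _⟩
            · exact absurd h h0
            · exact absurd h h1
            · exact absurd h h2
            all_goals norm_num
          rw [pvMin_eq _ 3 hmem hlb]
          rw [if_neg (by simpa [pvG0, List.any_eq_true] using h0),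
              if_neg (by simpa [pvG1, List.any_eq_true] using h1),
              if_neg (by simpa [pvG2, List.any_eq_true] using h2),
              if_pos (by simpa [pvG3, List.any_eq_true] using h3)]
          rfl
        · have hnil : pvCatsOf text = [] := by
            rw [List.eq_nil_iff_forall_not_mem]
            intro c hc
            rcases (pvMem_cats_iff text c).1 hc with ⟨_, h⟩ | ⟨_, h⟩ | ⟨_, h⟩ | ⟨_, h⟩
            · exact absurd h h0
            · exact absurd h h1
            · exact absurd h h2
            · exact absurd h h3
          rw [if_neg (by simpa [pvG0, List.any_eq_true] using h0),
              if_neg (by simpa [pvG1, List.any_eq_true] using h1),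
              if_neg (by simpa [pvG2, List.any_eq_true] using h2),
              if_neg (by simpa [pvG3, List.any_eq_true] using h3), hnil]
          rfl
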